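-- pv_equiv track=rewrite | github.com/mauryaaryan/pulseai | pulseai/member2_voice_agent/services/risk_scorer.py | _calculate_symptom_severity
-- ===== SOURCE A (Python) =====
-- def _calculate_symptom_severity(symptoms: list) -> int:
--     if not symptoms: return 0
--     points = 0
--     severe_count = 0
--     for s in symptoms:
--         if s['severity'] == 'severe':
--             points += 30
--             severe_count += 1
--         elif s['severity'] == 'moderate':
--             points += 15
--         else:
--             points += 5
--
--     if severe_count > 1:
--         points += 5
--
--     return min(points, 100)
-- ===== SOURCE B (Python) =====
-- def _calculate_symptom_severity(symptoms: list) -> int: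
--     # Divide-and-conquer: recursively tally (points, severe_count) over halves,
--     # then apply the multi-severe bonus and the cap once at the top.
--     def tally(seg):
--         if len(seg) == 0:
--             return (0, 0)
--         if len(seg) == 1:
--             sev = seg[0]['severity']
--             if sev == 'severe':
--                 return (30, 1)
--             if sev == 'moderate':
--                 return (15, 0)
--             return (5, 0)
--         mid = len(seg) // 2
--         p1, c1 = tally(seg[:mid])
--         p2, c2 = tally(seg[mid:])
--         return (p1 + p2, c1 + c2)
--
--     points, severe = tally(symptoms)
--     if severe > 1:
--         points += 5
--     return min(points, 100)
-- ===== Notes on version B (the rewrite author's own statement) =====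
-- stated objective: alternative
-- what changed: Replaces the single accumulating branch-per-element loop with a divide-and-conquer recursion that tallies (points, severe_count) over list halves and applies the bonus and cap once at the root.
import Mathlib
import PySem

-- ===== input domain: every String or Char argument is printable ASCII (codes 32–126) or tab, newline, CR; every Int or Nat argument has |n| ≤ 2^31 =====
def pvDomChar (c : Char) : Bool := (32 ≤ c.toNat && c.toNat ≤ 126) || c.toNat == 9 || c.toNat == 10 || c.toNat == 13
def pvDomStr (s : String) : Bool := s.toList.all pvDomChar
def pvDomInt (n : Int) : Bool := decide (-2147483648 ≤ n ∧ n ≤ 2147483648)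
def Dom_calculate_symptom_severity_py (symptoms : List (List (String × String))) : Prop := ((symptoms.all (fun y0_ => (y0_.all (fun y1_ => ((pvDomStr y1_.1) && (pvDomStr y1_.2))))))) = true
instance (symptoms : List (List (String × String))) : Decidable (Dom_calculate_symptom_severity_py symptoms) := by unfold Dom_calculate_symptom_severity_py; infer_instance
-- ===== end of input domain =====

-- B replaces the accumulating branch-per-element loop by a divide-and-conquer recursion over
-- list halves that tallies (points, severe_count), applying the bonus and cap once at the root
-- (alternative decomposition, same exact result).

-- ===== PORT A =====
-- s['severity'] : first match in the association list; Pre_ guarantees the key exists, so the default is unreachable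
def pvSevOf (s : List (String × String)) : String :=
  ((PySem.Dict.mk s).get? "severity").getD ""

def pvStepA (acc : Int × Int) (s : List (String × String)) : Int × Int :=
  let sev := pvSevOf s
  if sev == "severe" then (acc.1 + 30, acc.2 + 1)
  else if sev == "moderate" then (acc.1 + 15, acc.2)
  else (acc.1 + 5, acc.2)

def calculate_symptom_severity_py (symptoms : List (List (String × String))) : Int :=
  if symptoms = [] then 0
  else
    let r := symptoms.foldl pvStepA (0, 0)
    let points := if r.2 > 1 then r.1 + 5 else r.1
    min points 100

-- ===== PORT B =====
-- divide-and-conquer tally of (points, severe_count), as in Source B's `tally` (slices = take/drop)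
def pvTally (seg : List (List (String × String))) : Int × Int :=
  match seg with
  | [] => (0, 0)
  | [s] =>
      let sev := pvSevOf s
      if sev == "severe" then (30, 1)
      else if sev == "moderate" then (15, 0)
      else (5, 0)
  | a :: b :: t =>
      let seg' := a :: b :: t
      let mid := seg'.length / 2
      let r1 := pvTally (seg'.take mid)
      let r2 := pvTally (seg'.drop mid)
      (r1.1 + r2.1, r1.2 + r2.2)
termination_by seg.length
decreasing_by
  · simp [List.length_take]; omega
  · simp; omega

def calculate_symptom_severity_py_alt (symptoms : List (List (String × String))) : Int :=
  let r := pvTally symptoms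
  let points := if r.2 > 1 then r.1 + 5 else r.1
  min points 100

-- ===== PRECONDITION & SPEC =====
-- Pre_ excludes symptoms missing the 'severity' key, on which A (and B) raise KeyError.
def Pre_calculate_symptom_severity_py (symptoms : List (List (String × String))) : Prop :=
  (symptoms.all (fun s => s.any (fun kv => kv.1 == "severity"))) = true
instance (symptoms : List (List (String × String))) : Decidable (Pre_calculate_symptom_severity_py symptoms) := by unfold Pre_calculate_symptom_severity_py; infer_instance

def pvWitness_calculate_symptom_severity_py : (List (List (String × String))) :=
  [[("severity", "severe")], [("severity", "mild")]]

def Spec_calculate_symptom_severity_py (symptoms : List (List (String × String))) (out : Int) : Prop := out = calculate_symptom_severity_py_alt symptoms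
instance (symptoms : List (List (String × String))) (out : Int) : Decidable (Spec_calculate_symptom_severity_py symptoms out) := by unfold Spec_calculate_symptom_severity_py; infer_instance

-- ===== CLAIM (what is proved, stated in full; the proofs are below) =====
def Claim_equal_calculate_symptom_severity_py : Prop := ∀ (symptoms : List (List (String × String))), Dom_calculate_symptom_severity_py symptoms → Pre_calculate_symptom_severity_py symptoms → Spec_calculate_symptom_severity_py symptoms (calculate_symptom_severity_py symptoms)

-- ===== LEMMAS AND PROOFS =====
-- per-element points
def pvPts (s : List (String × String)) : Int :=
  if pvSevOf s == "severe" then 30 else if pvSevOf s == "moderate" then 15 else 5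

theorem pvTally_eq (l : List (List (String × String))) :
    pvTally l = ((l.map pvPts).sum, ((l.map pvSevOf).count "severe" : Int)) := by
  induction l using pvTally.induct with
  | case1 => simp [pvTally]
  | case2 s sev h1 =>
      have h1' : pvSevOf s = "severe" := eq_of_beq h1
      simp [pvTally, pvPts, h1']
  | case3 s sev h1 h2 =>
      have h1' : (pvSevOf s == "severe") = false := eq_false_of_ne_true h1
      have h2' : pvSevOf s = "moderate" := eq_of_beq h2
      simp [pvTally, pvPts, h2']
  | case4 s sev h1 h2 =>
      have h1' : (pvSevOf s == "severe") = false := eq_false_of_ne_true h1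
      have h2' : (pvSevOf s == "moderate") = false := eq_false_of_ne_true h2
      have e3 : (("severe" : String) == pvSevOf s) = false := by
        simp at h1' ⊢; exact fun e => h1' e.symm
      simp [pvTally, pvPts, h1', h2', List.count_singleton]
  | case5 a b t seg' mid ih1 ih2 =>
      rw [pvTally]
      rw [ih1, ih2]
      have h := List.take_append_drop ((a :: b :: t).length / 2) (a :: b :: t)
      conv_rhs => rw [← h]
      rw [List.map_append, List.sum_append, List.map_append, List.count_append]
      push_cast
      rfl

theorem pvFoldA (l : List (List (String × String))) (p sc : Int) :
    l.foldl pvStepA (p, sc) =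
      (p + (l.map pvPts).sum, sc + ((l.map pvSevOf).count "severe" : Int)) := by
  induction l generalizing p sc with
  | nil => simp
  | cons h t ih =>
    simp only [List.foldl_cons, List.map_cons, List.count_cons, List.sum_cons, pvStepA, pvPts]
    by_cases h1 : pvSevOf h = "severe"
    · simp only [h1, beq_self_eq_true, if_pos]
      rw [ih]; simp; constructor <;> ring
    · by_cases h2 : pvSevOf h = "moderate"
      · have e1 : (pvSevOf h == "severe") = false := by simp [h1]
        have e3 : (("severe" : String) == pvSevOf h) = false := by
          simp; exact fun e => h1 e.symm
        simp only [h2, beq_self_eq_true, if_true]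
        rw [ih]; simp [Prod.ext_iff]; omega
      · have e1 : (pvSevOf h == "severe") = false := by simp [h1]
        have e2 : (pvSevOf h == "moderate") = false := by simp [h2]
        have e3 : (("severe" : String) == pvSevOf h) = false := by
          simp; exact fun e => h1 e.symm
        simp only [e1, e2, Bool.false_eq_true]
        rw [ih]; simp [Prod.ext_iff]; omega

-- ===== VERDICT (by name: the statement is the Claim_ definition above) =====
theorem calculate_symptom_severity_py_spec : Claim_equal_calculate_symptom_severity_py := by
  intro symptoms _ _
  unfold Spec_calculate_symptom_severity_py
  unfold calculate_symptom_severity_py calculate_symptom_severity_py_alt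
  rw [pvTally_eq]
  by_cases he : symptoms = []
  · subst he; simp
  · simp only [he, if_false]
    rw [pvFoldA]
    simp
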